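-- pv_equiv track=rewrite | github.com/ut-issl/veriq | src/veriq/_cli/graph_query.py | _find_non_leaf_paths
-- ===== SOURCE A (Python) =====
-- def _is_path_prefix_of(prefix_str: str, path_str: str) -> bool:
--     """Check if prefix_str is a proper path prefix of path_str.
--
--     A proper prefix means path_str starts with prefix_str followed by
--     '.' (attribute access) or '[' (item access).
--
--     Args:
--         prefix_str: The potential prefix path string.
--         path_str: The path string to check against.
--
--     Returns:
--         True if prefix_str is a proper path prefix of path_str.
--
--     """
--     if not path_str.startswith(prefix_str):
--         return False
--     if len(path_str) <= len(prefix_str):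
--         return False
--     next_char = path_str[len(prefix_str)]
--     return next_char in (".", "[")
--
-- def _find_non_leaf_paths(paths: set[str]) -> set[str]:
--     """Find all path strings that have children (are non-leaf).
--
--     A path is non-leaf if another path exists that starts with it
--     followed by '.' or '['.
--
--     Args:
--         paths: Set of path strings to analyze.
--
--     Returns:
--         Set of path strings that are non-leaf (have children).
--
--     """
--     non_leaf: set[str] = set()
--     for path_str in paths:
--         for other_str in paths:
--             if path_str != other_str and _is_path_prefix_of(path_str, other_str):
--                 non_leaf.add(path_str)
--                 break
--     return non_leaf
-- ===== SOURCE B (Python) =====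
-- def _find_non_leaf_paths(paths: set[str]) -> set[str]:
--     """One pass: mark every '.'/'['-boundary prefix found in any path, then keep the paths that were marked."""
--     marked: set[str] = set()
--     for q in paths:
--         for i, c in enumerate(q):
--             if c == "." or c == "[":
--                 marked.add(q[:i])
--     return {p for p in paths if p in marked}
-- ===== Notes on version B (the rewrite author's own statement) =====
-- stated objective: faster
-- what changed: Instead of testing every ordered pair of paths with a prefix check, B makes one pass that inserts each '.'/'['-boundary prefix of each path into a set and then keeps exactly the input paths found in that set.
import Mathlib
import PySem

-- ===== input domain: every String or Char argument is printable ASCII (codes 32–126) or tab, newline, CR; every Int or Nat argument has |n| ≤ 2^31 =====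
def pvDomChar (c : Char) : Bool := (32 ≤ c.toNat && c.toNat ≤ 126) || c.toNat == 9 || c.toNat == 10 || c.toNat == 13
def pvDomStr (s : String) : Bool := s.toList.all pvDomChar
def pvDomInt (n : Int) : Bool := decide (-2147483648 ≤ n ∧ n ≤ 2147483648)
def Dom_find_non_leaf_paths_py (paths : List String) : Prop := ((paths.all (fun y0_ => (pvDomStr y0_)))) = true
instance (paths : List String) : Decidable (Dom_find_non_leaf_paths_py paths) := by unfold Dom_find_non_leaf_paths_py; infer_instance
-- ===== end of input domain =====

-- B replaces A's pairwise prefix scan by a single pass that collects the '.'/'['-boundary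
-- prefixes of every path into a set and then filters the input paths by membership in it.

-- ===== PORT A =====
def is_path_prefix_of (prefix_str path_str : String) : Bool :=
  if !(PySem.Str.startswith path_str prefix_str) then false
  else if PySem.Str.len path_str ≤ PySem.Str.len prefix_str then false
  else
    -- in range because of the two guards above, so pyGet? is never none here
    match PySem.Str.pyGet? path_str (PySem.Str.len prefix_str) with
    | some next_char => next_char == '.' || next_char == '['
    | none => false

def find_non_leaf_paths_py (paths : List String) : List String :=
  paths.foldl (fun non_leaf path_str =>
    -- the inner 'for … : if …: add; break' loop adds path_str iff some other_str passes the test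
    if paths.any (fun other_str => path_str != other_str && is_path_prefix_of path_str other_str)
    then PySem.Set.add non_leaf path_str else non_leaf) PySem.Set.empty

-- ===== PORT B =====
def find_non_leaf_paths_py_alt (paths : List String) : List String :=
  let marked : PySem.Set String :=
    paths.foldl (fun m q =>
      (PySem.List.enumerate q.toList 0).foldl (fun m ic =>
        if ic.2 == '.' || ic.2 == '[' then PySem.Set.add m (PySem.Str.slice q none (some ic.1)) else m) m)
      PySem.Set.empty
  paths.foldl (fun res p => if PySem.Set.contains marked p then PySem.Set.add res p else res)
    PySem.Set.empty

-- ===== PRECONDITION & SPEC =====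
def Spec_find_non_leaf_paths_py (paths : List String) (out : List String) : Prop := out = find_non_leaf_paths_py_alt paths
instance (paths : List String) (out : List String) : Decidable (Spec_find_non_leaf_paths_py paths out) := by unfold Spec_find_non_leaf_paths_py; infer_instance

-- ===== CLAIM (what is proved, stated in full; the proofs are below) =====
def Claim_equal_find_non_leaf_paths_py : Prop := ∀ (paths : List String), Dom_find_non_leaf_paths_py paths → Spec_find_non_leaf_paths_py paths (find_non_leaf_paths_py paths)

-- ===== LEMMAS AND PROOFS =====

-- membership in a fold that conditionally adds f b for each b of l
lemma mem_foldl_add_if {α β : Type} [BEq α] [LawfulBEq α]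
    (l : List β) (cond : β → Bool) (f : β → α) (m0 : PySem.Set α) (x : α) :
    (x ∈ l.foldl (fun m b => if cond b then PySem.Set.add m (f b) else m) m0) ↔
      x ∈ m0 ∨ ∃ b ∈ l, cond b ∧ f b = x := by
  induction l generalizing m0 with
  | nil => simp
  | cons b l ih =>
    simp only [List.foldl_cons, ih, List.mem_cons]
    by_cases hb : cond b = true
    · simp only [hb, if_true, PySem.Set.mem_add]
      aesop
    · simp only [hb, Bool.false_eq_true, if_false]
      aesop

-- characterisation of membership in B's 'marked' set
lemma mem_marked (paths : List String) (p : String) :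
    (p ∈ paths.foldl (fun m q =>
      (PySem.List.enumerate q.toList 0).foldl (fun m ic =>
        if ic.2 == '.' || ic.2 == '[' then PySem.Set.add m (PySem.Str.slice q none (some ic.1)) else m) m)
      PySem.Set.empty) ↔
    ∃ q ∈ paths, ∃ ic ∈ PySem.List.enumerate q.toList 0,
      (ic.2 == '.' || ic.2 == '[') = true ∧ PySem.Str.slice q none (some ic.1) = p := by
  have step : ∀ (m0 : PySem.Set String) (l : List String),
      (p ∈ l.foldl (fun m q =>
        (PySem.List.enumerate q.toList 0).foldl (fun m ic =>
          if ic.2 == '.' || ic.2 == '[' then PySem.Set.add m (PySem.Str.slice q none (some ic.1)) else m) m) m0) ↔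
      p ∈ m0 ∨ ∃ q ∈ l, ∃ ic ∈ PySem.List.enumerate q.toList 0,
        (ic.2 == '.' || ic.2 == '[') = true ∧ PySem.Str.slice q none (some ic.1) = p := by
    intro m0 l
    induction l generalizing m0 with
    | nil => simp
    | cons q l ih =>
      simp only [List.foldl_cons, ih, List.mem_cons,
        mem_foldl_add_if (PySem.List.enumerate q.toList 0)
          (fun ic => ic.2 == '.' || ic.2 == '[') (fun ic => PySem.Str.slice q none (some ic.1)) m0 p]
      aesop
  rw [step]
  simp [PySem.Set.empty]

-- A's prefix test holds iff the longer string has p before a '.'/'[' boundary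
lemma is_path_prefix_of_iff (p q : String) :
    is_path_prefix_of p q = true ↔
    ∃ ic ∈ PySem.List.enumerate q.toList 0,
      (ic.2 == '.' || ic.2 == '[') = true ∧ PySem.Str.slice q none (some ic.1) = p := by
  constructor
  · intro h
    unfold is_path_prefix_of at h
    by_cases hsw : PySem.Str.startswith q p = true
    · rw [hsw] at h
      simp only [Bool.not_true, Bool.false_eq_true, if_false] at h
      by_cases hlen : PySem.Str.len q ≤ PySem.Str.len p
      · rw [if_pos hlen] at h
        exact absurd h (by simp)
      · rw [if_neg hlen] at h
        cases hget : PySem.Str.pyGet? q (PySem.Str.len p) with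
        | none => rw [hget] at h; simp at h
        | some c =>
          rw [hget] at h
          have hpref : p.toList <+: q.toList := by
            simp only [PySem.Str.startswith] at hsw
            exact (PySem.Chars.startswith_iff _ _).mp hsw
          have hlt : p.toList.length < q.toList.length := by
            simp only [PySem.Str.len] at hlen
            exact_mod_cast not_le.mp hlen
          have hc : q.toList[p.toList.length]? = some c := by
            simp only [PySem.Str.len, PySem.Str.pyGet?_natCast] at hget
            exact hget
          obtain ⟨hh, hval⟩ := List.getElem?_eq_some_iff.mp hc
          refine ⟨((p.toList.length : Int), c), ?_, by simpa using h, ?_⟩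
          · rw [PySem.List.mem_enumerate_iff]
            exact ⟨p.toList.length, hlt, by rw [hval]; simp⟩
          · apply String.ext
            rw [show ((p.toList.length : Int), c).1 = (p.toList.length : Int) from rfl,
              PySem.Str.toList_slice, PySem.Chars.slice_eq_listSlice, PySem.List.slice_to_natCast]
            exact (List.prefix_iff_eq_take.mp hpref).symm
    · rw [Bool.not_eq_true] at hsw
      rw [hsw] at h
      simp at h
  · rintro ⟨⟨i, c⟩, hic, hcnd, hsl⟩
    rw [PySem.List.mem_enumerate_iff] at hic
    rcases hic with ⟨k, hk, hpair⟩
    have hi : i = (k : Int) := by simpa using congrArg Prod.fst hpair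
    have hcc : c = q.toList[k] := by simpa using congrArg Prod.snd hpair
    have hptl : p.toList = q.toList.take k := by
      have h' := congrArg String.toList hsl
      rw [PySem.Str.toList_slice, PySem.Chars.slice_eq_listSlice] at h'
      rw [← h', show ((i, c).1) = i from rfl, hi, PySem.List.slice_to_natCast]
    have hplen : p.toList.length = k := by rw [hptl, List.length_take]; omega
    unfold is_path_prefix_of
    have hsw : PySem.Str.startswith q p = true := by
      simp only [PySem.Str.startswith]
      exact (PySem.Chars.startswith_iff _ _).mpr ⟨q.toList.drop k, by rw [hptl]; simp⟩
    have hlen : ¬ (PySem.Str.len q ≤ PySem.Str.len p) := by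
      simp only [PySem.Str.len]
      have : p.toList.length < q.toList.length := by omega
      exact_mod_cast not_le.mpr this
    rw [hsw]
    simp only [Bool.not_true, Bool.false_eq_true, if_false, if_neg hlen]
    have hget : PySem.Str.pyGet? q (PySem.Str.len p) = some c := by
      simp only [PySem.Str.len, PySem.Str.pyGet?_natCast, hplen]
      simp [hcc, List.getElem?_eq_getElem hk]
    rw [hget]
    simpa using hcnd

-- A's per-path condition agrees with B's membership test
lemma cond_agree (paths : List String) (p : String) :
    (paths.any (fun other_str => p != other_str && is_path_prefix_of p other_str)) =
    PySem.Set.contains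
      (paths.foldl (fun m q =>
        (PySem.List.enumerate q.toList 0).foldl (fun m ic =>
          if ic.2 == '.' || ic.2 == '[' then PySem.Set.add m (PySem.Str.slice q none (some ic.1)) else m) m)
        PySem.Set.empty) p := by
  have hne : ∀ q : String, is_path_prefix_of p q = true → p ≠ q := by
    intro q h hpq
    subst hpq
    unfold is_path_prefix_of at h
    have hsw : PySem.Str.startswith p p = true := by
      simp only [PySem.Str.startswith]
      exact (PySem.Chars.startswith_iff _ _).mpr (List.prefix_refl _)
    rw [hsw] at h
    simp at h
  rw [Bool.eq_iff_iff]
  constructor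
  · intro h
    rw [List.any_eq_true] at h
    rcases h with ⟨q, hq, hcond⟩
    rw [Bool.and_eq_true] at hcond
    rcases (is_path_prefix_of_iff p q).mp hcond.2 with ⟨ic, hic, h1, h2⟩
    rw [PySem.Set.contains_iff]
    exact (mem_marked paths p).mpr ⟨q, hq, ic, hic, h1, h2⟩
  · intro h
    rw [PySem.Set.contains_iff] at h
    rcases (mem_marked paths p).mp h with ⟨q, hq, ic, hic, h1, h2⟩
    have hpp : is_path_prefix_of p q = true := (is_path_prefix_of_iff p q).mpr ⟨ic, hic, h1, h2⟩
    rw [List.any_eq_true]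
    exact ⟨q, hq, by simp [bne_iff_ne, hne q hpp, hpp]⟩

-- ===== VERDICT (by name: the statement is the Claim_ definition above) =====
theorem find_non_leaf_paths_py_spec : Claim_equal_find_non_leaf_paths_py := by
  intro paths _
  show find_non_leaf_paths_py paths = find_non_leaf_paths_py_alt paths
  unfold find_non_leaf_paths_py find_non_leaf_paths_py_alt
  dsimp only
  apply PySem.List.foldl_congr_mem
  intro acc p hp
  rw [cond_agree paths p]
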